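-- pv_equiv track=rewrite | github.com/zckr08/Proyecto-0-Codificaci-n | main().py | validarTexto
-- ===== SOURCE A (Python) =====
-- def validarTexto(texto):
--     """Esta es una función booleana que va a recibir un texto y va a verificar si contiene
--        únicamente letras y espacios.
--        Entradas: texto = String.
--        Salidas: True si el solo contiene letras y espacios.
--                 False en caso contrario.
--        Restricciones: Ninguna.
--     """
--     texto = texto.lower()
--     texto = texto.replace("á", "a")
--     texto = texto.replace("é", "e")
--     texto = texto.replace("í", "i")
--     texto = texto.replace("ó", "o")
--     texto = texto.replace("ú", "u")
--     texto = texto.replace("ü", "u")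
--     for caracter in texto:
--         if caracter not in ("abcdefghijklmnñopqrstuvwxyz "):
--             return False
--     return True
-- ===== SOURCE B (Python) =====
-- import re
--
-- _FULL = re.compile(r'[a-z\u00f1 ]*')
--
-- def validarTexto(texto):
--     texto = texto.lower()
--     texto = texto.replace("á", "a")
--     texto = texto.replace("é", "e")
--     texto = texto.replace("í", "i")
--     texto = texto.replace("ó", "o")
--     texto = texto.replace("ú", "u")
--     texto = texto.replace("ü", "u")
--     return bool(_FULL.fullmatch(texto))
-- ===== Notes on version B (the rewrite author's own statement) =====
-- stated objective: idiomatic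
-- what changed: The explicit for-loop with early return testing each char's membership in an alphabet string is replaced by a single compiled regular-expression fullmatch against the class [a-zñ ]* (same lower/replace preprocessing). The validation runs inside the C regex engine instead of a Python-level loop (constant-factor speedup).
import Mathlib
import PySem

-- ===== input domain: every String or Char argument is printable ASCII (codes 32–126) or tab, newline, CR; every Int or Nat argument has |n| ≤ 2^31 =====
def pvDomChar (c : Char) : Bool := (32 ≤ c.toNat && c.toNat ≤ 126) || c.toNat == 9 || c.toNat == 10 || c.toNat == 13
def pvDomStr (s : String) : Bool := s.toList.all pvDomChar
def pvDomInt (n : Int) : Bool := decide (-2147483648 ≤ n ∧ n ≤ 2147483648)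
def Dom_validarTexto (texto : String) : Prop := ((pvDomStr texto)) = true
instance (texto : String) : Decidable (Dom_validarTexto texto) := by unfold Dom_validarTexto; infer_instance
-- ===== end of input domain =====

-- B replaces A's early-return membership loop by one regular-expression fullmatch over the class [a-zñ ] (idiomatic; same preprocessing, return value only).


-- shared preprocessing: both Pythons perform literally these same lower/replace steps
def pvPrep (texto : String) : String :=
  let t := PySem.Str.lower texto
  let t := PySem.Str.replace t "á" "a"
  let t := PySem.Str.replace t "é" "e"
  let t := PySem.Str.replace t "í" "i"
  let t := PySem.Str.replace t "ó" "o"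
  let t := PySem.Str.replace t "ú" "u"
  let t := PySem.Str.replace t "ü" "u"
  t

-- ===== PORT A =====
-- `caracter not in "abc…"` on a single char is exactly list membership of that char
def pvLoopA : List Char → Bool
  | [] => true
  | c :: rest =>
      if (c ∈ "abcdefghijklmnñopqrstuvwxyz ".toList) then pvLoopA rest else false

def validarTexto (texto : String) : Bool := pvLoopA (pvPrep texto).toList

-- ===== PORT B =====
-- re.fullmatch(r'[a-zñ ]*', t): every char of t lies in the class [a-zñ ]
def pvClassB (c : Char) : Bool := ('a' ≤ c && c ≤ 'z') || c == 'ñ' || c == ' '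

def validarTexto_alt (texto : String) : Bool := (pvPrep texto).toList.all pvClassB

-- ===== PRECONDITION & SPEC =====
def Spec_validarTexto (texto : String) (out : Bool) : Prop := out = validarTexto_alt texto
instance (texto : String) (out : Bool) : Decidable (Spec_validarTexto texto out) := by unfold Spec_validarTexto; infer_instance

-- ===== CLAIM (what is proved, stated in full; the proofs are below) =====
def Claim_equal_validarTexto : Prop := ∀ (texto : String), Dom_validarTexto texto → Spec_validarTexto texto (validarTexto texto)

-- ===== LEMMAS AND PROOFS =====
lemma pv_mem_iff_class (c : Char) :
    (c ∈ "abcdefghijklmnñopqrstuvwxyz ".toList) ↔ pvClassB c = true := by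
  have hlist : "abcdefghijklmnñopqrstuvwxyz ".toList =
      ['a','b','c','d','e','f','g','h','i','j','k','l','m','n','ñ','o','p','q','r','s','t','u','v','w','x','y','z',' '] := by
    decide
  have hext : ∀ d : Char, c = d ↔ c.val.toNat = d.val.toNat := by
    intro d
    constructor
    · rintro rfl; rfl
    · intro h; exact Char.ext (by exact UInt32.toNat_inj.mp h)
  have hv : ('a'.val.toNat = 97) ∧ ('b'.val.toNat = 98) ∧ ('c'.val.toNat = 99) ∧ ('d'.val.toNat = 100) ∧ ('e'.val.toNat = 101) ∧ ('f'.val.toNat = 102) ∧ ('g'.val.toNat = 103) ∧ ('h'.val.toNat = 104) ∧ ('i'.val.toNat = 105) ∧ ('j'.val.toNat = 106) ∧ ('k'.val.toNat = 107) ∧ ('l'.val.toNat = 108) ∧ ('m'.val.toNat = 109) ∧ ('n'.val.toNat = 110) ∧ ('ñ'.val.toNat = 241) ∧ ('o'.val.toNat = 111) ∧ ('p'.val.toNat = 112) ∧ ('q'.val.toNat = 113) ∧ ('r'.val.toNat = 114) ∧ ('s'.val.toNat = 115) ∧ ('t'.val.toNat = 116) ∧ ('u'.val.toNat = 117) ∧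 ('v'.val.toNat = 118) ∧ ('w'.val.toNat = 119) ∧ ('x'.val.toNat = 120) ∧ ('y'.val.toNat = 121) ∧ ('z'.val.toNat = 122) ∧ (' '.val.toNat = 32) := by decide
  simp only [hlist, List.mem_cons, List.not_mem_nil, or_false, pvClassB,
    Bool.or_eq_true, Bool.and_eq_true, decide_eq_true_eq, beq_iff_eq, hext,
    Char.le_def, UInt32.le_iff_toNat_le]
  omega

lemma pv_loopA_eq_all (l : List Char) : pvLoopA l = l.all pvClassB := by
  induction l with
  | nil => rfl
  | cons c rest ih =>
      cases hc : pvClassB c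
      · have h : ¬ (c ∈ "abcdefghijklmnñopqrstuvwxyz ".toList) := fun hm => by
          rw [(pv_mem_iff_class c).mp hm] at hc; exact Bool.true_eq_false.mp hc
        rw [pvLoopA, if_neg h, List.all_cons, hc, Bool.false_and]
      · have h : c ∈ "abcdefghijklmnñopqrstuvwxyz ".toList := (pv_mem_iff_class c).mpr hc
        rw [pvLoopA, if_pos h, ih, List.all_cons, hc, Bool.true_and]

-- ===== VERDICT (by name: the statement is the Claim_ definition above) =====
theorem validarTexto_spec : Claim_equal_validarTexto := by
  intro texto _
  unfold Spec_validarTexto validarTexto validarTexto_alt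
  exact pv_loopA_eq_all _
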